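-- pv_equiv track=rewrite | github.com/linki1010111/keipuro | src/to_compare_read.py | merge_evaluation_lists
-- ===== SOURCE A (Python) =====
-- from typing import List, Tuple, Any
--
-- def merge_evaluation_lists(
--     list1: List[List[Any]],
--     list2: List[List[Any]]
-- ) -> List[List[Any]]:
--     """
--     [文章, 評価1] の形式のリストと [文章, 評価2] の形式のリストを受け取り、
--     共通の文章に基づいて [文章, 評価1, 評価2] の形式で結合したリストを返します。
--
--     Args:
--         list1 (List[List[Any]]): 最初の評価リスト。各要素は [文章, 評価1] の形式。
--         list2 (List[List[Any]]): 2番目の評価リスト。各要素は [文章, 評価2] の形式。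
--
--     Returns:
--         List[List[Any]]: 結合されたリスト。各要素は [文章, 評価1, 評価2] の形式。
--                          どちらかのリストにしか存在しない文章の場合、
--                          対応する評価は None になります。
--     """
--     merged_data = {}
--
--     # list1 のデータを辞書に格納
--     for item in list1:
--         if len(item) == 2:
--             article, eval1 = item
--             merged_data[article] = [eval1, None] # 評価2は仮にNoneとする
--
--     # list2 のデータを辞書に結合
--     for item in list2:
--         if len(item) == 2:
--             article, eval2 = item
--             if article in merged_data:
--                 # 既に存在する場合、評価2を追加
--                 merged_data[article][1] = eval2
--             else:
--                 # list1 に存在しない文章の場合、新規追加（評価1はNone）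
--                 merged_data[article] = [None, eval2]
--
--     # 辞書のデータを最終的なリスト形式に変換
--     result_list = []
--     for article, evaluations in merged_data.items():
--         result_list.append([article, evaluations[0], evaluations[1]])
--
--     return result_list
-- ===== SOURCE B (Python) =====
-- from typing import List, Any
--
-- def merge_evaluation_lists(list1: List[List[Any]], list2: List[List[Any]]) -> List[List[Any]]:
--     # Dict-free nested-scan join: ordered distinct keys, then per-key reverse scans
--     # of the raw lists for the last matching evaluation (last occurrence wins).
--     def last_eval(lst, t):
--         for it in reversed(lst):
--             if len(it) == 2 and it[0] == t:
--                 return it[1]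
--         return None
--     keys = []
--     for lst in (list1, list2):
--         for it in lst:
--             if len(it) == 2 and it[0] not in keys:
--                 keys.append(it[0])
--     return [[t, last_eval(list1, t), last_eval(list2, t)] for t in keys]
-- ===== Notes on version B (the rewrite author's own statement) =====
-- stated objective: alternative
-- what changed: A builds one hash dict of mutable [eval1, eval2] pairs patched in place across two passes and flattens it; B uses no dict at all: it collects the ordered distinct keys by list-membership scans and then, for each key, finds each evaluation by a reverse linear scan of the raw input list (last occurrence wins), trading hashing for nested scans.
import Mathlib
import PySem

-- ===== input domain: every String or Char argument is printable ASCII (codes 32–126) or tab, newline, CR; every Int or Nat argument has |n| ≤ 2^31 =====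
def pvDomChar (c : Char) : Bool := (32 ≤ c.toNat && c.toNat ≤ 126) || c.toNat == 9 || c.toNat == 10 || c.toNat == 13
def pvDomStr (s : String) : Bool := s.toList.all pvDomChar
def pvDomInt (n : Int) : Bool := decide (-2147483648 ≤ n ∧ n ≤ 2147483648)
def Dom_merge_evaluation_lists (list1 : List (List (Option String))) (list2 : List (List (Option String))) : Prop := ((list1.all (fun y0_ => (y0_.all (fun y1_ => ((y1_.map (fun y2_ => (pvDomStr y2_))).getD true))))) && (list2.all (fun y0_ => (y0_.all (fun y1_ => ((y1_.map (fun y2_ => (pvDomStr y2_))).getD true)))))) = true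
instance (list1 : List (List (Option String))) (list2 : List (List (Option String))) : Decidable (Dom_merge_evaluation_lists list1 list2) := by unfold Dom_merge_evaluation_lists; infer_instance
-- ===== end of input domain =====

-- B replaces A's single hash dict of mutable [eval1, eval2] pairs by a dict-free nested-scan join:
-- an ordered distinct-key list plus, per key, a reverse linear scan of each raw input list (alternative, not faster).


-- ===== PORT A =====
def merge_evaluation_lists (list1 : List (List (Option String))) (list2 : List (List (Option String))) : List (List (Option String)) :=
  -- merged_data = {}; for item in list1: if len(item)==2: merged_data[article] = [eval1, None]
  let merged1 : PySem.Dict (Option String) (Option String × Option String) :=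
    list1.foldl (fun m item =>
      match item with
      | [article, eval1] => m.insert article (eval1, (none : Option String))
      | _ => m) PySem.Dict.empty
  -- for item in list2: if len(item)==2: ... update or add
  let merged2 :=
    list2.foldl (fun m item =>
      match item with
      | [article, eval2] =>
          if m.contains article then
            m.modify article ((none : Option String), (none : Option String)) (fun p => (p.1, eval2))
          else
            m.insert article ((none : Option String), eval2)
      | _ => m) merged1
  -- result_list = []; for article, evaluations in merged_data.items(): result_list.append([...])
  merged2.items.foldl (fun r kv => r ++ [[kv.1, kv.2.1, kv.2.2]]) []

-- ===== PORT B =====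
-- 'len(it) == 2 and it[0] == t' matcher of B's inner reverse scan (length test + indexing, as in Source B)
def pvMatch (t : Option String) (it : List (Option String)) : Option (Option String) :=
  if it.length = 2 && it.getD 0 none == t then some (it.getD 1 none) else none

-- 'for it in reversed(lst): if len(it)==2 and it[0]==t: return it[1]; return None'
def pvLastEval (lst : List (List (Option String))) (t : Option String) : Option String :=
  (lst.reverse.findSome? (pvMatch t)).getD none

-- 'if len(it) == 2 and it[0] not in keys: keys.append(it[0])'
def pvKeysStep (ks : List (Option String)) (it : List (Option String)) : List (Option String) :=
  if it.length = 2 && !(ks.contains (it.getD 0 none)) then ks ++ [it.getD 0 none] else ks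

def merge_evaluation_lists_alt (list1 : List (List (Option String))) (list2 : List (List (Option String))) : List (List (Option String)) :=
  let keys := list2.foldl pvKeysStep (list1.foldl pvKeysStep [])
  keys.map (fun t => [t, pvLastEval list1 t, pvLastEval list2 t])

-- ===== PRECONDITION & SPEC =====
def Spec_merge_evaluation_lists (list1 : List (List (Option String))) (list2 : List (List (Option String))) (out : List (List (Option String))) : Prop := out = merge_evaluation_lists_alt list1 list2
instance (list1 : List (List (Option String))) (list2 : List (List (Option String))) (out : List (List (Option String))) : Decidable (Spec_merge_evaluation_lists list1 list2 out) := by unfold Spec_merge_evaluation_lists; infer_instance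

-- ===== CLAIM (what is proved, stated in full; the proofs are below) =====
def Claim_equal_merge_evaluation_lists : Prop := ∀ (list1 : List (List (Option String))) (list2 : List (List (Option String))), Dom_merge_evaluation_lists list1 list2 → Spec_merge_evaluation_lists list1 list2 (merge_evaluation_lists list1 list2)

-- ===== LEMMAS AND PROOFS =====

-- the items of length 2, as (text, eval) pairs
def pvValid (l : List (List (Option String))) : List (Option String × Option String) :=
  l.filterMap (fun item =>
    match item with
    | [] => none
    | [_] => none
    | a :: e :: rest => if rest = [] then some (a, e) else none)

def pvIns (d : PySem.Dict (Option String) (Option String)) (p : Option String × Option String) :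
    PySem.Dict (Option String) (Option String) := d.insert p.1 p.2

def pvStepA1 (m : PySem.Dict (Option String) (Option String × Option String))
    (p : Option String × Option String) : PySem.Dict (Option String) (Option String × Option String) :=
  m.insert p.1 (p.2, (none : Option String))

def pvStepA2 (m : PySem.Dict (Option String) (Option String × Option String))
    (p : Option String × Option String) : PySem.Dict (Option String) (Option String × Option String) :=
  if m.contains p.1 then
    m.modify p.1 ((none : Option String), (none : Option String)) (fun q => (q.1, p.2))
  else
    m.insert p.1 ((none : Option String), p.2)

def pvRow (d1 dp : PySem.Dict (Option String) (Option String)) (k : Option String) :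
    Option String × (Option String × Option String) := (k, (d1.getD k none, dp.getD k none))

def pvRowX (dp : PySem.Dict (Option String) (Option String)) (k : Option String) :
    Option String × (Option String × Option String) := (k, ((none : Option String), dp.getD k none))

def pvM (d1 : PySem.Dict (Option String) (Option String)) (Kx : List (Option String))
    (dp : PySem.Dict (Option String) (Option String)) :
    List (Option String × (Option String × Option String)) :=
  d1.keys.map (pvRow d1 dp) ++ Kx.map (pvRowX dp)

lemma pvContains_lift (d : PySem.Dict (Option String) (Option String)) (a : Option String) :
    (PySem.Dict.mk (d.items.map (fun q => (q.1, (q.2, (none : Option String)))))).contains a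
    = d.contains a := by
  simp [PySem.Dict.contains, List.any_map, Function.comp_def]

lemma pvLiftInsert (d : PySem.Dict (Option String) (Option String)) (a e : Option String) :
    (PySem.Dict.mk (d.items.map (fun q => (q.1, (q.2, (none : Option String)))))).insert a (e, (none : Option String))
    = PySem.Dict.mk ((d.insert a e).items.map (fun q => (q.1, (q.2, (none : Option String))))) := by
  by_cases h : d.contains a = true
  · simp only [PySem.Dict.insert, pvContains_lift, h, if_true]
    apply PySem.Dict.ext
    simp only [List.map_map]
    apply List.map_congr_left
    intro p _
    by_cases hp : p.1 = a <;> simp [hp]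
  · simp only [PySem.Dict.insert, pvContains_lift, h, if_false, Bool.false_eq_true]
    apply PySem.Dict.ext
    simp

lemma pvFindRow {β : Type} (g : Option String → β) (K : List (Option String)) (a : Option String) :
  (K.map (fun k => (k, g k))).find? (fun q => q.1 == a) = if a ∈ K then some (a, g a) else none := by
  induction K with
  | nil => simp
  | cons k K ih =>
    by_cases hk : k = a
    · subst hk; simp
    · simp only [List.map_cons, List.find?_cons, show ((k, g k).1 == a) = false by simpa using hk, ih]
      simp [Ne.symm hk]

lemma pvM_contains (d1 : PySem.Dict (Option String) (Option String)) (Kx : List (Option String))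
    (dp : PySem.Dict (Option String) (Option String)) (a : Option String) :
    (PySem.Dict.mk (pvM d1 Kx dp)).contains a = (d1.contains a || decide (a ∈ Kx)) := by
  simp only [PySem.Dict.contains, pvM, pvRow, pvRowX, List.any_append, List.any_map,
    Function.comp_def, PySem.Dict.keys]
  rw [List.any_beq']
  simp

lemma pvM_getD (d1 : PySem.Dict (Option String) (Option String)) (Kx : List (Option String))
    (dp : PySem.Dict (Option String) (Option String)) (a : Option String)
    (h : a ∈ d1.keys ∨ a ∈ Kx) :
    (PySem.Dict.mk (pvM d1 Kx dp)).getD a ((none : Option String), none)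
    = (d1.getD a none, dp.getD a none) := by
  have hrow : (d1.keys.map (pvRow d1 dp)) = d1.keys.map (fun k => (k, (d1.getD k none, dp.getD k none))) := rfl
  have hrowx : (Kx.map (pvRowX dp)) = Kx.map (fun k => (k, ((none : Option String), dp.getD k none))) := rfl
  have hget : (PySem.Dict.mk (pvM d1 Kx dp)).get? a
      = (List.find? (fun q => q.1 == a) (pvM d1 Kx dp)).map (fun x => x.2) := rfl
  rw [PySem.Dict.getD_eq_get?_getD, hget]
  unfold pvM
  rw [hrow, hrowx, List.find?_append,
    pvFindRow (fun k => (d1.getD k none, dp.getD k none)) d1.keys a,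
    pvFindRow (fun k => ((none : Option String), dp.getD k none)) Kx a]
  by_cases h1 : a ∈ d1.keys
  · simp [h1]
  · have h2 : a ∈ Kx := h.resolve_left h1
    have hc : d1.contains a = false := by
      rw [PySem.Dict.contains_eq_decide_mem_keys]; simpa using h1
    simp [h1, h2, PySem.Dict.getD_of_not_contains _ _ hc]

lemma pvM_replace (d1 : PySem.Dict (Option String) (Option String)) (Kx : List (Option String))
    (dp : PySem.Dict (Option String) (Option String)) (a e : Option String)
    (hKx : ∀ k ∈ Kx, d1.contains k = false) :
    (pvM d1 Kx dp).map (fun q => if q.1 == a then (a, (d1.getD a none, e)) else q)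
    = pvM d1 Kx (dp.insert a e) := by
  unfold pvM
  rw [List.map_append, List.map_map, List.map_map]
  congr 1
  · apply List.map_congr_left
    intro k _
    by_cases hk : k = a
    · subst hk; simp [pvRow, PySem.Dict.getD_insert_self]
    · simp [pvRow, hk, PySem.Dict.getD_insert_of_ne dp _ _ hk]
  · apply List.map_congr_left
    intro k hkKx
    by_cases hk : k = a
    · subst hk
      have : d1.getD k none = none := PySem.Dict.getD_of_not_contains _ _ (hKx k hkKx)
      simp [pvRowX, this, PySem.Dict.getD_insert_self]
    · simp [pvRowX, hk, PySem.Dict.getD_insert_of_ne dp _ _ hk]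

lemma pvM_fresh (d1 : PySem.Dict (Option String) (Option String)) (Kx : List (Option String))
    (dp : PySem.Dict (Option String) (Option String)) (a e : Option String)
    (h1 : d1.contains a = false) (h2 : a ∉ Kx) :
    pvM d1 Kx dp ++ [(a, ((none : Option String), e))] = pvM d1 (Kx ++ [a]) (dp.insert a e) := by
  unfold pvM
  rw [List.map_append, List.append_assoc]
  congr 1
  · apply List.map_congr_left
    intro k hk
    have hne : k ≠ a := by
      intro hEq; subst hEq
      rw [PySem.Dict.contains_eq_decide_mem_keys] at h1; simp [hk] at h1
    simp [pvRow, PySem.Dict.getD_insert_of_ne dp _ _ hne]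
  · congr 1
    · apply List.map_congr_left
      intro k hk
      have hne : k ≠ a := fun hEq => h2 (hEq ▸ hk)
      simp [pvRowX, PySem.Dict.getD_insert_of_ne dp _ _ hne]
    · simp [pvRowX, PySem.Dict.getD_insert_self]

lemma pvLoop1 (P : List (Option String × Option String)) (d : PySem.Dict (Option String) (Option String)) :
    P.foldl pvStepA1 (PySem.Dict.mk (d.items.map (fun q => (q.1, (q.2, (none : Option String))))))
    = PySem.Dict.mk ((P.foldl pvIns d).items.map (fun q => (q.1, (q.2, (none : Option String))))) := by
  induction P generalizing d with
  | nil => rfl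
  | cons p P ih =>
    simp only [List.foldl_cons]
    rw [show pvStepA1 (PySem.Dict.mk (d.items.map (fun q => (q.1, (q.2, (none : Option String)))))) p
        = PySem.Dict.mk ((d.insert p.1 p.2).items.map (fun q => (q.1, (q.2, (none : Option String))))) from pvLiftInsert d p.1 p.2]
    exact ih (d.insert p.1 p.2)

lemma pvLoop2 (d1 : PySem.Dict (Option String) (Option String))
    (P : List (Option String × Option String)) (Kx : List (Option String))
    (dp : PySem.Dict (Option String) (Option String))
    (hKx : ∀ k ∈ Kx, d1.contains k = false) :
    P.foldl pvStepA2 (PySem.Dict.mk (pvM d1 Kx dp))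
    = PySem.Dict.mk (pvM d1
        (P.foldl (fun ks p => if (d1.contains p.1 || ks.contains p.1) then ks else ks ++ [p.1]) Kx)
        (P.foldl pvIns dp)) := by
  induction P generalizing Kx dp with
  | nil => rfl
  | cons p P ih =>
    obtain ⟨a, e⟩ := p
    simp only [List.foldl_cons]
    by_cases hin : (d1.contains a || decide (a ∈ Kx)) = true
    · have hcont : (PySem.Dict.mk (pvM d1 Kx dp)).contains a = true := by
        rw [pvM_contains]; exact hin
      have hmem : a ∈ d1.keys ∨ a ∈ Kx := by
        rcases Bool.or_eq_true_iff.mp hin with h | h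
        · left; rw [PySem.Dict.contains_eq_decide_mem_keys] at h; simpa using h
        · right; simpa using h
      have hstep : pvStepA2 (PySem.Dict.mk (pvM d1 Kx dp)) (a, e)
          = PySem.Dict.mk (pvM d1 Kx (dp.insert a e)) := by
        show (if (PySem.Dict.mk (pvM d1 Kx dp)).contains a then _ else _) = _
        rw [if_pos hcont]
        show (PySem.Dict.mk (pvM d1 Kx dp)).insert a
            ((((PySem.Dict.mk (pvM d1 Kx dp)).getD a ((none : Option String), none)).1, e))
            = PySem.Dict.mk (pvM d1 Kx (dp.insert a e))
        rw [pvM_getD d1 Kx dp a hmem]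
        rw [PySem.Dict.insert, if_pos hcont]
        exact congrArg PySem.Dict.mk (pvM_replace d1 Kx dp a e hKx)
      have hseen : (if (d1.contains a || Kx.contains a) then Kx else Kx ++ [a]) = Kx := by
        simp only [List.contains_eq_mem]; rw [if_pos hin]
      rw [hstep, hseen]
      exact ih Kx (dp.insert a e) hKx
    · have hc1 : d1.contains a = false := by
        cases h : d1.contains a <;> simp [h] at hin ⊢
      have hc2 : a ∉ Kx := by
        cases h : decide (a ∈ Kx) <;> simp_all
      have hcont : (PySem.Dict.mk (pvM d1 Kx dp)).contains a = false := by
        rw [pvM_contains, hc1]; simpa using hc2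
      have hstep : pvStepA2 (PySem.Dict.mk (pvM d1 Kx dp)) (a, e)
          = PySem.Dict.mk (pvM d1 (Kx ++ [a]) (dp.insert a e)) := by
        show (if (PySem.Dict.mk (pvM d1 Kx dp)).contains a then _ else _) = _
        rw [if_neg (by simp [hcont])]
        show (PySem.Dict.mk (pvM d1 Kx dp)).insert a ((none : Option String), e) = _
        rw [PySem.Dict.insert, if_neg (by simp [hcont])]
        exact congrArg PySem.Dict.mk (pvM_fresh d1 Kx dp a e hc1 hc2)
      have hKx' : ∀ k ∈ Kx ++ [a], d1.contains k = false := by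
        intro k hk
        rcases List.mem_append.mp hk with h | h
        · exact hKx k h
        · simp at h; subst h; exact hc1
      have hseen : (if (d1.contains a || Kx.contains a) then Kx else Kx ++ [a]) = Kx ++ [a] := by
        rw [if_neg]; simp [hc1, hc2]
      rw [hstep, hseen]
      exact ih (Kx ++ [a]) (dp.insert a e) hKx'

-- pvFold1: loop 1 of A is a fold over the valid (len-2) pairs
lemma pvFold1 (l : List (List (Option String))) (m : PySem.Dict (Option String) (Option String × Option String)) :
    l.foldl (fun m item =>
      match item with
      | [article, eval1] => m.insert article (eval1, (none : Option String))
      | _ => m) m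
    = (pvValid l).foldl pvStepA1 m := by
  induction l generalizing m with
  | nil => rfl
  | cons it l ih =>
    match it with
    | [] => simpa [pvValid] using ih m
    | [a] => simpa [pvValid] using ih m
    | [a, e] => simpa [pvValid, pvStepA1] using ih (m.insert a (e, none))
    | (a :: e :: x :: t) => simpa [pvValid] using ih m

-- pvFold2: loop 2 of A is a fold over the valid (len-2) pairs
lemma pvFold2 (l : List (List (Option String))) (m : PySem.Dict (Option String) (Option String × Option String)) :
    l.foldl (fun m item =>
      match item with
      | [article, eval2] =>
          if m.contains article then
            m.modify article ((none : Option String), (none : Option String)) (fun p => (p.1, eval2))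
          else
            m.insert article ((none : Option String), eval2)
      | _ => m) m
    = (pvValid l).foldl pvStepA2 m := by
  induction l generalizing m with
  | nil => rfl
  | cons it l ih =>
    match it with
    | [] => simpa [pvValid] using ih m
    | [a] => simpa [pvValid] using ih m
    | [a, e] => simpa [pvValid, pvStepA2] using ih _
    | (a :: e :: x :: t) => simpa [pvValid] using ih m

-- B's key loop is a fold over the valid pairs' first components
lemma pvKeysFold (l : List (List (Option String))) (ks : List (Option String)) :
    l.foldl pvKeysStep ks
    = (pvValid l).foldl (fun s p => if s.contains p.1 then s else s ++ [p.1]) ks := by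
  induction l generalizing ks with
  | nil => rfl
  | cons it l ih =>
    match it with
    | [] => simpa [pvValid, pvKeysStep] using ih ks
    | [a] => simpa [pvValid, pvKeysStep] using ih ks
    | [a, e] => simpa [pvValid, pvKeysStep] using ih _
    | (a :: e :: x :: t) => simpa [pvValid, pvKeysStep] using ih ks

-- shifting the accumulated prefix K0 out of the dedup fold
lemma pvKeysShift (P : List (Option String × Option String)) (K0 : List (Option String)) :
    ∀ acc : List (Option String),
    P.foldl (fun s p => if s.contains p.1 then s else s ++ [p.1]) (K0 ++ acc)
    = K0 ++ P.foldl (fun ks p => if (K0.contains p.1 || ks.contains p.1) then ks else ks ++ [p.1]) acc := by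
  induction P with
  | nil => intro acc; rfl
  | cons p P ih =>
    intro acc
    simp only [List.foldl_cons]
    have hmem : (K0 ++ acc).contains p.1 = (K0.contains p.1 || acc.contains p.1) := by
      simp [List.contains_eq_mem, List.mem_append]
    rw [hmem]
    by_cases h : (K0.contains p.1 || acc.contains p.1) = true
    · rw [if_pos h, if_pos h]; exact ih acc
    · rw [if_neg h, if_neg h, List.append_assoc]; exact ih (acc ++ [p.1])

-- every key produced by the Kx fold is absent from d1
lemma pvKxNotIn (d1 : PySem.Dict (Option String) (Option String))
    (P : List (Option String × Option String)) :
    ∀ acc : List (Option String), (∀ k ∈ acc, d1.contains k = false) →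
    ∀ k ∈ P.foldl (fun ks p => if (d1.contains p.1 || ks.contains p.1) then ks else ks ++ [p.1]) acc,
      d1.contains k = false := by
  induction P with
  | nil => intro acc h; exact h
  | cons p P ih =>
    intro acc hacc
    simp only [List.foldl_cons]
    by_cases h : (d1.contains p.1 || acc.contains p.1) = true
    · rw [if_pos h]; exact ih acc hacc
    · rw [if_neg h]
      refine ih (acc ++ [p.1]) ?_
      intro k hk
      rcases List.mem_append.mp hk with hk | hk
      · exact hacc k hk
      · simp at hk; subst hk
        by_cases hc : d1.contains p.1 = true
        · exact absurd (by simp [hc]) h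
        · simpa using hc

-- the last-wins lookup: a reverse scan equals the fold-insert dict lookup
lemma pvGetD_find (l : List (List (Option String))) (t : Option String) :
    ∀ d : PySem.Dict (Option String) (Option String),
    ((pvValid l).foldl pvIns d).getD t none
    = (l.reverse.findSome? (pvMatch t)).getD (d.getD t none) := by
  induction l with
  | nil => intro d; simp [pvValid]
  | cons it l ih =>
    intro d
    rw [List.reverse_cons, List.findSome?_append]
    match it with
    | [] =>
      have : pvMatch t ([] : List (Option String)) = none := rfl
      simp [pvValid, List.findSome?] at *
      exact ih d
    | [a] =>
      simp [pvValid, List.findSome?, pvMatch] at *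
      exact ih d
    | (a :: e :: x :: tl) =>
      simp [pvValid, List.findSome?, pvMatch] at *
      exact ih d
    | [a, e] =>
      have hval : pvValid ([a, e] :: l) = (a, e) :: pvValid l := by simp [pvValid]
      rw [hval, List.foldl_cons, ih (pvIns d (a, e))]
      cases hF : l.reverse.findSome? (pvMatch t) with
      | some v => simp [hF]
      | none =>
        by_cases hat : a = t
        · subst hat
          simp [pvMatch, pvIns, PySem.Dict.getD_insert_self, List.findSome?]
        · simp [pvMatch, hat, pvIns, PySem.Dict.getD_insert_of_ne d _ _ (Ne.symm hat), List.findSome?]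

lemma pvLastEval_eq (l : List (List (Option String))) (t : Option String) :
    pvLastEval l t = ((pvValid l).foldl pvIns PySem.Dict.empty).getD t none := by
  rw [pvGetD_find]
  rfl

-- ===== VERDICT (by name: the statement is the Claim_ definition above) =====
theorem merge_evaluation_lists_spec : Claim_equal_merge_evaluation_lists := by
  intro l1 l2 _
  unfold Spec_merge_evaluation_lists merge_evaluation_lists merge_evaluation_lists_alt
  simp only []
  rw [pvFold1, pvFold2]
  set d1 := (pvValid l1).foldl pvIns PySem.Dict.empty with hd1
  set d2 := (pvValid l2).foldl pvIns PySem.Dict.empty with hd2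
  have hd1nodup : d1.keys.Nodup :=
    PySem.Dict.nodup_keys_foldl_insert_key (pvValid l1) Prod.fst (fun _ p => p.2)
      PySem.Dict.empty PySem.Dict.nodup_keys_empty
  have e1 : (pvValid l1).foldl pvStepA1 PySem.Dict.empty
      = PySem.Dict.mk (pvM d1 [] PySem.Dict.empty) := by
    refine Eq.trans (pvLoop1 (pvValid l1) PySem.Dict.empty) ?_
    refine congrArg PySem.Dict.mk ?_
    rw [PySem.Dict.items_eq_map_keys _ hd1nodup none, List.map_map]
    simp [pvM, pvRow, Function.comp_def]
  rw [e1, pvLoop2 _ (pvValid l2) [] PySem.Dict.empty (by simp)]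
  set Kx := (pvValid l2).foldl (fun ks p =>
      if (d1.contains p.1 || ks.contains p.1) then ks else ks ++ [p.1]) [] with hKxdef
  have hitems : (PySem.Dict.mk (pvM d1 Kx ((pvValid l2).foldl pvIns PySem.Dict.empty))).items
      = pvM d1 Kx d2 := rfl
  rw [hitems]
  refine (PySem.List.foldl_append_singleton_eq_map
    (fun (kv : Option String × (Option String × Option String)) => [kv.1, kv.2.1, kv.2.2]) _ []).trans ?_
  rw [List.nil_append]
  -- B's key list is d1.keys ++ Kx
  have hK1 : l1.foldl pvKeysStep [] = d1.keys := by
    rw [pvKeysFold]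
    have h' : d1.keys = PySem.Set.update PySem.Dict.empty.keys ((pvValid l1).map Prod.fst) :=
      PySem.Dict.keys_foldl_insert_key (pvValid l1) Prod.fst (fun _ p => p.2) PySem.Dict.empty
    rw [h']
    show _ = ((pvValid l1).map Prod.fst).foldl PySem.Set.add []
    rw [List.foldl_map]
    rfl
  have hfun : (fun (ks : List (Option String)) (p : Option String × Option String) =>
        if (d1.keys.contains p.1 || ks.contains p.1) then ks else ks ++ [p.1])
      = (fun ks p => if (d1.contains p.1 || ks.contains p.1) then ks else ks ++ [p.1]) := by
    funext ks p
    rw [show d1.keys.contains p.1 = d1.contains p.1 from by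
      rw [PySem.Dict.contains_eq_decide_mem_keys]; simp [List.contains_eq_mem]]
  have hkeys : l2.foldl pvKeysStep (l1.foldl pvKeysStep []) = d1.keys ++ Kx := by
    rw [hK1, pvKeysFold]
    have hshift := pvKeysShift (pvValid l2) d1.keys []
    rw [List.append_nil] at hshift
    rw [hshift, hfun]
  rw [hkeys]
  have hKxfree : ∀ k ∈ Kx, d1.contains k = false :=
    pvKxNotIn d1 (pvValid l2) [] (by simp)
  unfold pvM
  rw [List.map_append, List.map_append, List.map_map, List.map_map]
  congr 1
  · apply List.map_congr_left
    intro k _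
    simp [pvRow, Function.comp_def, pvLastEval_eq, ← hd1, ← hd2]
  · apply List.map_congr_left
    intro k hk
    have hnone : d1.getD k none = none :=
      PySem.Dict.getD_of_not_contains _ _ (hKxfree k hk)
    simp [pvRowX, Function.comp_def, pvLastEval_eq, ← hd1, ← hd2, hnone]
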